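-- pv_equiv track=rewrite | github.com/webclinic017/Icarus- | icarus/report/report_writer.py | evaluate_filename
-- ===== SOURCE A (Python) =====
-- def evaluate_filename(indice, reporter=None, special_char=True):
--
--     # Check if there are multiple symbols or timeframes
--     symbol = indice[0][0]
--     timeframe = indice[0][1]
--     analyzer = indice[0][2]
--     if len(indice) > 1:
--         for ind in indice[1:]:
--             if ind[0] != symbol:
--                 symbol = '<symbol>'
--
--             if ind[1] != timeframe:
--                 timeframe = '<timeframe>'
--
--             if ind[2] != analyzer:
--                 analyzer = '<analyzer>'
--
--     if reporter == None:
--         filename = '{}_{}_{}'.format(symbol, timeframe, analyzer)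
--     else:
--         filename = '{}_{}_{}_{}'.format(reporter, symbol, timeframe, analyzer)
--
--     if not special_char:
--         return filename.replace('<', '').replace('>', '')
--
--     return filename
-- ===== SOURCE B (Python) =====
-- def evaluate_filename(indice, reporter=None, special_char=True):
--     # seed from the first entry (empty indice raises IndexError, as in the original)
--     symbol, timeframe, analyzer = indice[0]
--     # each position agrees across all entries iff its value set is a singleton
--     if len({i[0] for i in indice}) != 1:
--         symbol = '<symbol>'
--     if len({i[1] for i in indice}) != 1:
--         timeframe = '<timeframe>'
--     if len({i[2] for i in indice}) != 1:
--         analyzer = '<analyzer>'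
--     parts = [symbol, timeframe, analyzer] if reporter is None else [reporter, symbol, timeframe, analyzer]
--     filename = '_'.join(parts)
--     if not special_char:
--         return filename.replace('<', '').replace('>', '')
--     return filename
-- ===== Notes on version B (the rewrite author's own statement) =====
-- stated objective: idiomatic
-- what changed: Replaces the single stateful scan over indice[1:] that degrades three accumulators with three independent set-cardinality tests (position agrees iff its value set is a singleton) and a '_'.join over the parts list instead of format.
import Mathlib
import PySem

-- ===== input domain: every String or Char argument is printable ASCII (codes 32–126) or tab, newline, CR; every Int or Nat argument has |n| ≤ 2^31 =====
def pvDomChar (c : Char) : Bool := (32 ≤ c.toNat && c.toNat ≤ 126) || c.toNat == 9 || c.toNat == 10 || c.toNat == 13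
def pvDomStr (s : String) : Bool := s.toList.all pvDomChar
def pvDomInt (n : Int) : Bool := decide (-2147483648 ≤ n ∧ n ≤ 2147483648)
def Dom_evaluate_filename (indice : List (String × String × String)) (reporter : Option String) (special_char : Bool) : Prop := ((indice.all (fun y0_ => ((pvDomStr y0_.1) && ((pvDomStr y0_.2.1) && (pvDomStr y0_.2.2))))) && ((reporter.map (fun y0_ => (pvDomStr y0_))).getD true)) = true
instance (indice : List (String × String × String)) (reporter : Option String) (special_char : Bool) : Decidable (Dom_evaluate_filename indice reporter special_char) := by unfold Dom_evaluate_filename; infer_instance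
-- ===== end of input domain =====

-- B replaces A's single stateful scan (three degrading accumulators) by three independent
-- set-cardinality agreement tests plus a '_'.join; same return value on every non-empty indice.


-- ===== PORT A =====
def evaluate_filename (indice : List (String × String × String)) (reporter : Option String) (special_char : Bool) : String :=
  match indice with
  | [] => ""  -- unreachable under Pre_ (Python raises IndexError)
  | ind0 :: rest =>
    -- symbol/timeframe/analyzer = indice[0]; the loop over indice[1:] (= rest) degrades them
    let st :=
      if indice.length > 1 then
        rest.foldl (fun (st : String × String × String) ind =>
          let s := if ind.1 != st.1 then "<symbol>" else st.1
          let t := if ind.2.1 != st.2.1 then "<timeframe>" else st.2.1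
          let a := if ind.2.2 != st.2.2 then "<analyzer>" else st.2.2
          (s, t, a)) (ind0.1, ind0.2.1, ind0.2.2)
      else (ind0.1, ind0.2.1, ind0.2.2)
    let filename :=
      match reporter with
      | none => st.1 ++ "_" ++ st.2.1 ++ "_" ++ st.2.2
      | some r => r ++ "_" ++ st.1 ++ "_" ++ st.2.1 ++ "_" ++ st.2.2
    if !special_char then PySem.Str.replace (PySem.Str.replace filename "<" "") ">" ""
    else filename

-- ===== PORT B =====
def evaluate_filename_alt (indice : List (String × String × String)) (reporter : Option String) (special_char : Bool) : String :=
  match indice with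
  | [] => ""  -- unreachable under Pre_ (Python raises IndexError)
  | ind0 :: _ =>
    let symbol := if PySem.Set.len (PySem.Set.ofList (indice.map (fun i => i.1))) != 1 then "<symbol>" else ind0.1
    let timeframe := if PySem.Set.len (PySem.Set.ofList (indice.map (fun i => i.2.1))) != 1 then "<timeframe>" else ind0.2.1
    let analyzer := if PySem.Set.len (PySem.Set.ofList (indice.map (fun i => i.2.2))) != 1 then "<analyzer>" else ind0.2.2
    let parts :=
      match reporter with
      | none => [symbol, timeframe, analyzer]
      | some r => [r, symbol, timeframe, analyzer]
    let filename := PySem.Str.join "_" parts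
    if !special_char then PySem.Str.replace (PySem.Str.replace filename "<" "") ">" ""
    else filename

-- ===== PRECONDITION & SPEC =====
-- Pre_ excludes exactly the empty list, on which both Pythons raise IndexError.
def Pre_evaluate_filename (indice : List (String × String × String)) (reporter : Option String) (special_char : Bool) : Prop := indice ≠ []
instance (indice : List (String × String × String)) (reporter : Option String) (special_char : Bool) : Decidable (Pre_evaluate_filename indice reporter special_char) := by unfold Pre_evaluate_filename; infer_instance
def pvWitness_evaluate_filename : (List (String × String × String)) × Option String × Bool := ([("BTC", "1h", "rsi"), ("ETH", "1h", "rsi")], some "report", false)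

def Spec_evaluate_filename (indice : List (String × String × String)) (reporter : Option String) (special_char : Bool) (out : String) : Prop := out = evaluate_filename_alt indice reporter special_char
instance (indice : List (String × String × String)) (reporter : Option String) (special_char : Bool) (out : String) : Decidable (Spec_evaluate_filename indice reporter special_char out) := by unfold Spec_evaluate_filename; infer_instance

-- ===== CLAIM (what is proved, stated in full; the proofs are below) =====
def Claim_equal_evaluate_filename : Prop := ∀ (indice : List (String × String × String)) (reporter : Option String) (special_char : Bool), Dom_evaluate_filename indice reporter special_char → Pre_evaluate_filename indice reporter special_char → Spec_evaluate_filename indice reporter special_char (evaluate_filename indice reporter special_char)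

-- ===== LEMMAS AND PROOFS =====

-- helper: String equality via toList
theorem str_toList_inj (x y : String) (h : x.toList = y.toList) : x = y := by
  have := congrArg String.ofList h; simpa using this

-- '_'.join on a 3- and a 4-element parts list, written as A's format concatenation
theorem join3 (a b c : String) : PySem.Str.join "_" [a, b, c] = a ++ "_" ++ b ++ "_" ++ c := by
  apply str_toList_inj
  simp [PySem.Str.join, PySem.Chars.join_cons_cons, PySem.Chars.join_singleton]

theorem join4 (r a b c : String) : PySem.Str.join "_" [r, a, b, c] = r ++ "_" ++ a ++ "_" ++ b ++ "_" ++ c := by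
  apply str_toList_inj
  simp [PySem.Str.join, PySem.Chars.join_cons_cons, PySem.Chars.join_singleton]

-- A's accumulator for one component: once degraded to the marker it stays, so the fold
-- returns the seed iff every element equals the seed.
theorem foldl_mark (m : String) (l : List String) (s : String) :
    l.foldl (fun s x => if x != s then m else s) s
      = if l.all (fun x => x == s) then s else m := by
  induction l generalizing s with
  | nil => simp
  | cons x xs ih =>
    by_cases hx : x = s
    · have hf : (x != s) = false := by simp [hx]
      have ht : (x == s) = true := by simp [hx]
      simp only [List.foldl_cons, List.all_cons, hf, Bool.false_eq_true, if_false, ht,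
        Bool.true_and]
      exact ih s
    · have ht : (x != s) = true := by simp [hx]
      have hf : (x == s) = false := by simp [hx]
      simp only [List.foldl_cons, List.all_cons, ht, if_true, hf, Bool.false_and,
        Bool.false_eq_true, if_false]
      rw [ih m]
      simp

-- the triple fold decomposes into three independent component folds
theorem foldl_triple (l : List (String × String × String)) (s t a : String) :
    l.foldl (fun (st : String × String × String) ind =>
        (if ind.1 != st.1 then "<symbol>" else st.1,
         if ind.2.1 != st.2.1 then "<timeframe>" else st.2.1,
         if ind.2.2 != st.2.2 then "<analyzer>" else st.2.2)) (s, t, a)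
      = ((l.map (fun i => i.1)).foldl (fun s x => if x != s then "<symbol>" else s) s,
         (l.map (fun i => i.2.1)).foldl (fun s x => if x != s then "<timeframe>" else s) t,
         (l.map (fun i => i.2.2)).foldl (fun s x => if x != s then "<analyzer>" else s) a) := by
  induction l generalizing s t a with
  | nil => simp
  | cons y ys ih =>
    simp only [List.foldl_cons, List.map_cons]
    exact ih _ _ _

-- a Nodup list whose elements all equal x has at most one element
theorem nodup_all_eq_len (x : String) (l : List String) (hnd : l.Nodup)
    (h : ∀ y ∈ l, y = x) : l.length ≤ 1 := by
  match l, hnd with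
  | [], _ => simp
  | [a], _ => simp
  | a :: b :: t, hnd =>
    exfalso
    have ha := h a (by simp)
    have hb := h b (by simp)
    have hnm : a ∉ b :: t := (List.nodup_cons.mp hnd).1
    exact hnm (by rw [ha, hb]; simp)

-- the set-cardinality test agrees with "all elements equal the first"
theorem set_len_one (x : String) (l : List String) :
    (PySem.Set.len (PySem.Set.ofList (x :: l)) == 1) = l.all (fun y => y == x) := by
  by_cases h : ∀ y ∈ l, y = x
  · have hlen : (PySem.Set.ofList (x :: l)).length ≤ 1 := by
      apply nodup_all_eq_len x _ (PySem.Set.nodup_ofList _)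
      intro y hy
      rcases List.mem_cons.mp ((PySem.Set.mem_ofList _ _).mp hy) with h1 | h2
      · exact h1
      · exact h y h2
    have hx : x ∈ PySem.Set.ofList (x :: l) := (PySem.Set.mem_ofList _ _).mpr (by simp)
    have hpos : 0 < (PySem.Set.ofList (x :: l)).length := List.length_pos_of_mem hx
    have hone : (PySem.Set.ofList (x :: l)).length = 1 := by omega
    have hall : l.all (fun y => y == x) = true := by
      simp only [List.all_eq_true, beq_iff_eq]; exact h
    simp [PySem.Set.len, hone, hall]
  · push_neg at h
    obtain ⟨y, hy, hyx⟩ := h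
    have hxm : x ∈ PySem.Set.ofList (x :: l) := (PySem.Set.mem_ofList _ _).mpr (by simp)
    have hym : y ∈ PySem.Set.ofList (x :: l) := (PySem.Set.mem_ofList _ _).mpr (by simp [hy])
    have hlen : (PySem.Set.ofList (x :: l)).length ≠ 1 := by
      intro h1
      match hl : PySem.Set.ofList (x :: l), h1 with
      | [z], _ =>
        rw [hl] at hxm hym
        simp at hxm hym
        exact hyx (hym.trans hxm.symm)
    have hall : l.all (fun y => y == x) = false := by
      rcases hc : l.all (fun y => y == x) with _ | _
      · rfl
      · exfalso
        have := List.all_eq_true.mp hc y hy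
        exact hyx (by simpa using this)
    simp [PySem.Set.len, hall]
    omega

-- ===== VERDICT (by name: the statement is the Claim_ definition above) =====
theorem ite_flip_bool (b : Bool) (u v : String) :
    (if (!b) = true then u else v) = if b = true then v else u := by
  cases b <;> simp

-- B's set-cardinality condition, as the negation of A's "all equal the seed"
theorem cond_eq (ind0 : String × String × String) (rest : List (String × String × String))
    (f : String × String × String → String) :
    (PySem.Set.len (PySem.Set.ofList ((ind0 :: rest).map f)) != 1)
      = !((rest.map f).all (fun y => y == f ind0)) := by
  rw [List.map_cons, bne, set_len_one]

theorem evaluate_filename_spec : Claim_equal_evaluate_filename := by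
  intro indice reporter special_char _ hpre
  unfold Spec_evaluate_filename
  cases indice with
  | nil => exact absurd rfl hpre
  | cons ind0 rest =>
    simp only [evaluate_filename, evaluate_filename_alt]
    rw [foldl_triple, foldl_mark, foldl_mark, foldl_mark,
        cond_eq ind0 rest (fun i => i.1), cond_eq ind0 rest (fun i => i.2.1),
        cond_eq ind0 rest (fun i => i.2.2)]
    simp only [ite_flip_bool]
    cases rest with
    | nil =>
      rw [if_neg (by simp : ¬ ((ind0 :: ([] : List (String × String × String))).length > 1))]
      cases reporter <;> simp [join3, join4]
    | cons r rs =>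
      rw [if_pos (by simp : (ind0 :: r :: rs).length > 1)]
      cases reporter <;> simp only [join3, join4]
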